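-- pv_equiv track=rewrite | github.com/aanxniee/competitive-programming | CCC/CCC '13 S1 - From 1987 to 2013.py | uniqueYear
-- ===== SOURCE A (Python) =====
-- def uniqueYear(a):
--     arr = [] # list to store digits
--     for i in range(len(a)): # iterate through the digits of the year
--         if a[i] in arr: # if digit is already in list, it is repeated
--             break
--         else:
--             arr.append(a[i]) # otherwise, add it to the list
--
--     if len(arr) == len(a): # if no digits are repeated, it is unique
--         return True
--     else:
--         return False
-- ===== SOURCE B (Python) =====
-- def uniqueYear(a):
--     return len(set(a)) == len(a)
-- ===== Notes on version B (the rewrite author's own statement) =====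
-- stated objective: idiomatic
-- what changed: Replaced the index loop with accumulator list, membership test and break by a single expression comparing len(set(a)) with len(a); the set's deduplication does the uniqueness check with no loop or branch.
import Mathlib
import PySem

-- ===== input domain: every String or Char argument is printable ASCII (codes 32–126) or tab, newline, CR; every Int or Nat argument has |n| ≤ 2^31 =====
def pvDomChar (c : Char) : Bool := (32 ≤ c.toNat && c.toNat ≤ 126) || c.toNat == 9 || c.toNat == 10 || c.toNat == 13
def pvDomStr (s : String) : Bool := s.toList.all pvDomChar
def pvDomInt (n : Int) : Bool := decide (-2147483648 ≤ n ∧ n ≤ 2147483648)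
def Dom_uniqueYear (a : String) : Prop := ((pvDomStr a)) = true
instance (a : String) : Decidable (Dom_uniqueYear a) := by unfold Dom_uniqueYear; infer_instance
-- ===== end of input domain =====

-- B replaces A's accumulate-and-break loop by comparing len(set(a)) with len(a) (idiomatic; return value only).

-- ===== PORT A =====
-- the loop 'for i in range(len(a)): if a[i] in arr: break else: arr.append(a[i])'
def uniqueYearLoop (rest : List Char) (arr : List Char) : List Char :=
  match rest with
  | [] => arr
  | c :: cs => if arr.contains c then arr else uniqueYearLoop cs (arr ++ [c])

def uniqueYear (a : String) : Bool :=
  let arr := uniqueYearLoop a.toList []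
  if arr.length = a.toList.length then true else false

-- ===== PORT B =====
def uniqueYear_alt (a : String) : Bool :=
  decide ((PySem.Set.ofList a.toList).length = a.toList.length)

-- ===== PRECONDITION & SPEC =====
def Spec_uniqueYear (a : String) (out : Bool) : Prop := out = uniqueYear_alt a
instance (a : String) (out : Bool) : Decidable (Spec_uniqueYear a out) := by unfold Spec_uniqueYear; infer_instance

-- ===== CLAIM (what is proved, stated in full; the proofs are below) =====
def Claim_equal_uniqueYear : Prop := ∀ (a : String), Dom_uniqueYear a → Spec_uniqueYear a (uniqueYear a)

-- ===== LEMMAS AND PROOFS =====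

-- membership bridge for Bool contains
theorem contains_mem (s : List Char) (c : Char) : s.contains c = true ↔ c ∈ s := by
  simp

-- A's loop fills arr until it is full or a repeat appears: filled-to-the-brim ↔ all distinct.
theorem uniqueYearLoop_length_iff (l arr : List Char) (h : arr.Nodup) :
    (uniqueYearLoop l arr).length = arr.length + l.length ↔ (arr ++ l).Nodup := by
  induction l generalizing arr with
  | nil => simpa [uniqueYearLoop] using h
  | cons c cs ih =>
    simp only [uniqueYearLoop, List.length_cons]
    by_cases hc : arr.contains c
    · have hmem : c ∈ arr := (contains_mem arr c).mp hc
      rw [if_pos hc]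
      constructor
      · intro hlen; omega
      · intro hnd
        rw [List.nodup_append] at hnd
        exact absurd (hnd.2.2 c hmem c List.mem_cons_self rfl) (fun h => h)
    · have hmem : c ∉ arr := fun hm => hc ((contains_mem arr c).mpr hm)
      rw [if_neg hc]
      have h' : (arr ++ [c]).Nodup := by
        rw [List.nodup_append]
        exact ⟨h, List.nodup_singleton c,
          fun x hx y hy he => hmem ((he.trans (List.mem_singleton.mp hy)) ▸ hx)⟩
      have hih := ih (arr ++ [c]) h'
      have heq : arr ++ c :: cs = (arr ++ [c]) ++ cs := by simp
      rw [heq, ← hih, List.length_append]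
      simp only [List.length_cons, List.length_nil]
      omega

-- set.add grows the accumulator by at most one, and by strictly less than the
-- input on a duplicate-containing input.
theorem foldl_add_bound (m : List Char) : ∀ (s : List Char),
    (m.foldl PySem.Set.add s).length ≤ s.length + m.length ∧
    (¬ (s ++ m).Nodup → (m.foldl PySem.Set.add s).length < s.length + m.length ∨ ¬ s.Nodup) := by
  induction m with
  | nil => intro s; simp
  | cons c cs ih =>
    intro s
    simp only [List.foldl_cons, List.length_cons]
    by_cases hc : s.contains c
    · have hadd : PySem.Set.add s c = s := by
        simp only [PySem.Set.add, PySem.Set.contains, hc, if_true]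
      rw [hadd]
      obtain ⟨hb, _⟩ := ih s
      refine ⟨by omega, fun _ => ?_⟩
      by_cases hnds : s.Nodup
      · left; omega
      · right; exact hnds
    · have hadd : PySem.Set.add s c = s ++ [c] := by
        simp only [PySem.Set.add, PySem.Set.contains, hc, Bool.false_eq_true, if_false]
      have hmem : c ∉ s := fun hm => hc ((contains_mem s c).mpr hm)
      rw [hadd]
      obtain ⟨hb, hs⟩ := ih (s ++ [c])
      simp only [List.length_append, List.length_cons, List.length_nil] at hb hs
      refine ⟨by omega, fun hnd => ?_⟩
      have hnd' : ¬ ((s ++ [c]) ++ cs).Nodup := by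
        rw [show (s ++ [c]) ++ cs = s ++ c :: cs by simp]
        exact hnd
      rcases hs hnd' with h1 | h2
      · left; omega
      · right
        intro hnds
        exact h2 (List.nodup_append.mpr ⟨hnds, List.nodup_singleton c,
          fun x hx y hy he => hmem ((he.trans (List.mem_singleton.mp hy)) ▸ hx)⟩)

-- set(a) keeps one copy of each element: full length ↔ all distinct.
theorem ofList_length_iff (l : List Char) :
    (PySem.Set.ofList l).length = l.length ↔ l.Nodup := by
  constructor
  · intro hlen
    by_contra hnd
    obtain ⟨_, h2⟩ := foldl_add_bound l []
    rcases h2 (by simpa using hnd) with h | h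
    · rw [PySem.Set.ofList_eq_foldl] at hlen
      simp only [List.length_nil, Nat.zero_add] at h
      omega
    · exact h List.nodup_nil
  · intro hnd
    rw [PySem.Set.ofList_eq_self_of_nodup l hnd]

theorem uniqueYear_eq_alt (a : String) : uniqueYear a = uniqueYear_alt a := by
  unfold uniqueYear uniqueYear_alt
  have hA := uniqueYearLoop_length_iff a.toList [] List.nodup_nil
  simp only [List.nil_append, List.length_nil, Nat.zero_add] at hA
  have hB := ofList_length_iff a.toList
  by_cases hcond : (uniqueYearLoop a.toList []).length = a.toList.length
  · rw [if_pos hcond]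
    exact (decide_eq_true (hB.mpr (hA.mp hcond))).symm
  · rw [if_neg hcond]
    have hno : ¬ (PySem.Set.ofList a.toList).length = a.toList.length :=
      fun he => hcond (hA.mpr (hB.mp he))
    exact (decide_eq_false hno).symm

-- ===== VERDICT (by name: the statement is the Claim_ definition above) =====
theorem uniqueYear_spec : Claim_equal_uniqueYear := by
  intro a _
  exact uniqueYear_eq_alt a
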